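-- pv_equiv track=rewrite | github.com/FernandoCallasaca/Examanes--Python | 26_10_2021/16.py | puntaje
-- ===== SOURCE A (Python) =====
-- def puntaje(lista, ganado = 3, empatado = 1):
--     puntos = 0
--     for i in lista:
--         if(i == 'G'):
--             puntos += ganado
--         elif(i == 'E'):
--             puntos += empatado
--     return puntos
-- ===== SOURCE B (Python) =====
-- def puntaje(lista, ganado=3, empatado=1):
--     tabla = {'G': ganado, 'E': empatado}
--     def go(xs):
--         if not xs:
--             return 0
--         if len(xs) == 1:
--             return tabla.get(xs[0], 0)
--         m = len(xs) // 2
--         return go(xs[:m]) + go(xs[m:])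
--     return go(list(lista))
-- ===== Notes on version B (the rewrite author's own statement) =====
-- stated objective: alternative
-- what changed: Replaced the left-to-right accumulating branch loop with a divide-and-conquer recursion: each element is scored via a lookup table {'G':ganado,'E':empatado} with default 0, and the list is recursively split in halves and the halves' scores added (correct because integer addition is associative).
import Mathlib
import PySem

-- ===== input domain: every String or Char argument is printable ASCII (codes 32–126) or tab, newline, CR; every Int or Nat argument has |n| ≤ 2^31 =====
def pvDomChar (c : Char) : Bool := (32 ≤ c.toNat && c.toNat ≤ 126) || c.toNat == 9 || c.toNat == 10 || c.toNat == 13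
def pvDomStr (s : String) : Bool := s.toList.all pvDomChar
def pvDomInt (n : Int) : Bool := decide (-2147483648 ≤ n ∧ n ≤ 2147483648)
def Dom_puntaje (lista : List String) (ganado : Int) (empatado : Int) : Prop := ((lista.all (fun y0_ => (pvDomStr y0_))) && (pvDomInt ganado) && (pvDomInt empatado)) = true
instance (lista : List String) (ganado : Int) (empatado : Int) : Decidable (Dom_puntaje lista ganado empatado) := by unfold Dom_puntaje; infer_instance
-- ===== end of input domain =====

-- ===== PORT A =====
-- B replaces A's accumulating branch loop by a divide-and-conquer recursion that scores each
-- element through a lookup table and adds the scores of the two halves (alternative decomposition).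
def puntaje (lista : List String) (ganado : Int) (empatado : Int) : Int :=
  lista.foldl (fun puntos i =>
    if i == "G" then puntos + ganado
    else if i == "E" then puntos + empatado
    else puntos) 0

-- ===== PORT B =====
-- tabla = {'G': ganado, 'E': empatado}
def puntajeTabla (ganado empatado : Int) : PySem.Dict String Int :=
  (PySem.Dict.empty.insert "G" ganado).insert "E" empatado

-- def go(xs): divide-and-conquer over the list, splitting at len(xs)//2
def puntajeGo (tabla : PySem.Dict String Int) : List String → Int
  | [] => 0
  | [x] => tabla.getD x 0
  -- m = len(xs)//2 is inlined in both occurrences; return go(xs[:m]) + go(xs[m:])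
  | x :: y :: rest =>
      puntajeGo tabla ((x :: y :: rest).take ((x :: y :: rest).length / 2)) +
      puntajeGo tabla ((x :: y :: rest).drop ((x :: y :: rest).length / 2))
termination_by xs => xs.length
decreasing_by
  · simp [List.length_take]; omega
  · simp [List.length_drop]; omega

def puntaje_alt (lista : List String) (ganado : Int) (empatado : Int) : Int :=
  puntajeGo (puntajeTabla ganado empatado) lista

-- ===== PRECONDITION & SPEC =====
def Spec_puntaje (lista : List String) (ganado : Int) (empatado : Int) (out : Int) : Prop := out = puntaje_alt lista ganado empatado
instance (lista : List String) (ganado : Int) (empatado : Int) (out : Int) : Decidable (Spec_puntaje lista ganado empatado out) := by unfold Spec_puntaje; infer_instance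

-- ===== CLAIM (what is proved, stated in full; the proofs are below) =====
def Claim_equal_puntaje : Prop := ∀ (lista : List String) (ganado : Int) (empatado : Int), Dom_puntaje lista ganado empatado → Spec_puntaje lista ganado empatado (puntaje lista ganado empatado)

-- ===== LEMMAS AND PROOFS =====
lemma puntajeGo_eq_sum (tabla : PySem.Dict String Int) (xs : List String) :
    puntajeGo tabla xs = (xs.map (fun x => tabla.getD x 0)).sum := by
  fun_induction puntajeGo tabla xs with
  | case1 => rfl
  | case2 x => simp
  | case3 x y rest ih1 ih2 =>
      rw [ih1, ih2, ← List.sum_append, ← List.map_append, List.take_append_drop]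

lemma puntaje_foldl (lista : List String) (ganado empatado acc : Int) :
    lista.foldl (fun puntos i =>
      if i == "G" then puntos + ganado
      else if i == "E" then puntos + empatado
      else puntos) acc
      = acc + (lista.map (fun x => (puntajeTabla ganado empatado).getD x 0)).sum := by
  induction lista generalizing acc with
  | nil => simp
  | cons h t ih =>
    simp only [List.foldl_cons, List.map_cons, List.sum_cons, ih]
    by_cases hG : h = "G"
    · simp [hG, puntajeTabla, PySem.Dict.getD, PySem.Dict.insert, PySem.Dict.empty, PySem.Dict.get?]; ring
    · by_cases hE : h = "E"
      · simp [hE, puntajeTabla, PySem.Dict.getD, PySem.Dict.insert, PySem.Dict.empty, PySem.Dict.get?]; ring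
      · have h1 : ("G" == h) = false := beq_eq_false_iff_ne.mpr (fun e => hG e.symm)
        have h2 : ("E" == h) = false := beq_eq_false_iff_ne.mpr (fun e => hE e.symm)
        have : (puntajeTabla ganado empatado).getD h 0 = 0 := by
          simp [puntajeTabla, PySem.Dict.getD, PySem.Dict.insert, PySem.Dict.empty, PySem.Dict.get?, List.find?, h1, h2]
        simp [hG, hE, this]

-- ===== VERDICT (by name: the statement is the Claim_ definition above) =====
theorem puntaje_spec : Claim_equal_puntaje := by
  intro lista ganado empatado _
  unfold Spec_puntaje puntaje puntaje_alt
  rw [puntajeGo_eq_sum, puntaje_foldl]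
  ring
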